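-- pv_equiv track=rewrite | github.com/leeyejin1231/PCCP | 14_PCCP 모의고사/04.py | solution
-- ===== SOURCE A (Python) =====
-- def solution(input_string):
--     answer = []
--     apear = []
--
--     for i in range(len(input_string)):
--         if input_string[i] not in apear:
--             apear.append(input_string[i])
--         else:
--             if input_string[i-1] != input_string[i] and input_string[i] not in answer:
--                 answer.append(str(input_string[i]))
--     if answer:
--         answer.sort()
--         return ''.join(answer)
--     else:
--         return 'N'
-- ===== SOURCE B (Python) =====
-- def solution(input_string):
--     # Collapse the string into maximal runs, count runs per character,
--     # and report (sorted) the characters that start at least two runs.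
--     runs = []
--     for ch in input_string:
--         if not runs or runs[-1] != ch:
--             runs.append(ch)
--     counts = {}
--     for k in runs:
--         counts[k] = counts.get(k, 0) + 1
--     repeated = sorted(k for k, c in counts.items() if c >= 2)
--     return ''.join(repeated) if repeated else 'N'
-- ===== Notes on version B (the rewrite author's own statement) =====
-- stated objective: alternative
-- what changed: A repeatedly scans its seen-characters and result lists inside an index loop that compares each character with its predecessor; B collapses the string into maximal runs in one pass, tallies runs per character in a dict, and reports the sorted characters with at least two runs.
import Mathlib
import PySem

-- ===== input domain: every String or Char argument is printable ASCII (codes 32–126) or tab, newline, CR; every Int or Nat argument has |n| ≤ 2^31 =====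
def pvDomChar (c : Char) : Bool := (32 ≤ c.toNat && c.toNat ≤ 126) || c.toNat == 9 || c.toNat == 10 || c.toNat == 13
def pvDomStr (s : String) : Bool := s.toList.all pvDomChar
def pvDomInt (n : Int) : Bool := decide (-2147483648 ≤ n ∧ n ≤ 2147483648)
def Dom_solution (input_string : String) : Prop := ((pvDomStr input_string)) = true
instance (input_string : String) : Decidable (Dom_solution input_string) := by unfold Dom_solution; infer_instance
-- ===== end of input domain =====

-- B replaces A's membership-scan index loop by a run-collapse plus a per-character run counter
-- (collect the characters that begin at least two maximal runs); objective: alternative.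

-- ===== PORT A =====
-- one iteration of A's 'for i in range(len(input_string))' body; state = (answer, apear)
def solutionStep (s : List Char) (st : List Char × List Char) (i : Int) : List Char × List Char :=
  let c := PySem.List.pyGetD s i ' '
  if ¬ st.2.contains c then (st.1, st.2 ++ [c])
  else if PySem.List.pyGetD s (i - 1) ' ' ≠ c ∧ ¬ st.1.contains c then (st.1 ++ [c], st.2)
  else st

def solution (input_string : String) : String :=
  let s := input_string.toList
  let st := (PySem.List.pyRange 0 (s.length : Int) 1).foldl (solutionStep s) ([], [])
  if st.1 ≠ [] then String.mk (PySem.List.sorted st.1 (fun x => x) false) else "N"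

-- ===== PORT B =====
-- the maximal-run keys of cs (Source B's first loop)
def runsOf (cs : List Char) : List Char :=
  cs.foldl (fun runs ch => if runs = [] ∨ runs.getLast? ≠ some ch then runs ++ [ch] else runs) []

def solution_alt (input_string : String) : String :=
  let runs := runsOf input_string.toList
  let counts := runs.foldl (fun (d : PySem.Dict Char Int) k => d.insert k (d.getD k 0 + 1)) PySem.Dict.empty
  let repeated := PySem.List.sorted ((counts.items.filter (fun p => 2 ≤ p.2)).map (·.1)) (fun x => x) false
  if repeated ≠ [] then String.mk repeated else "N"

-- ===== PRECONDITION & SPEC =====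
def Spec_solution (input_string : String) (out : String) : Prop := out = solution_alt input_string
instance (input_string : String) (out : String) : Decidable (Spec_solution input_string out) := by unfold Spec_solution; infer_instance

-- ===== CLAIM (what is proved, stated in full; the proofs are below) =====
def Claim_equal_solution : Prop := ∀ (input_string : String), Dom_solution input_string → Spec_solution input_string (solution input_string)

-- ===== LEMMAS AND PROOFS =====

-- run-collapse step of Source B, named for the proofs
def runStep (runs : List Char) (ch : Char) : List Char :=
  if runs = [] ∨ runs.getLast? ≠ some ch then runs ++ [ch] else runs

theorem runsOf_eq_foldl (cs : List Char) : runsOf cs = cs.foldl runStep [] := rfl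

theorem runsOf_append_singleton (p : List Char) (c : Char) :
    runsOf (p ++ [c]) = runStep (runsOf p) c := by
  simp [runsOf_eq_foldl, List.foldl_append, runStep]

theorem runsOf_getLast? (p : List Char) : (runsOf p).getLast? = p.getLast? := by
  induction p using List.reverseRecOn with
  | nil => rfl
  | append_singleton p c ih =>
      rw [runsOf_append_singleton, runStep]
      split_ifs with h
      · simp
      · push_neg at h
        simp [h.2]

theorem mem_runsOf (p : List Char) (c : Char) : c ∈ runsOf p ↔ c ∈ p := by
  induction p using List.reverseRecOn with
  | nil => simp [runsOf]
  | append_singleton p x ih =>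
      rw [runsOf_append_singleton, runStep]
      split_ifs with h
      · simp [ih]
      · push_neg at h
        have hx : x ∈ runsOf p := List.mem_of_getLast? h.2
        constructor
        · intro hc; simp [ih.mp hc]
        · intro hc
          rcases List.mem_append.mp hc with hc | hc
          · exact ih.mpr hc
          · simp at hc; subst hc; exact hx

theorem count_runsOf_zero (p : List Char) (c : Char) (hc : c ∉ p) :
    (runsOf p).count c = 0 := by
  rw [List.count_eq_zero]
  exact fun h => hc ((mem_runsOf p c).mp h)

theorem ofList_append_singleton (p : List Char) (c : Char) :
    PySem.Set.ofList (p ++ [c]) = PySem.Set.add (PySem.Set.ofList p) c := by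
  simp [PySem.Set.ofList_eq_foldl, List.foldl_append]

-- joint invariant of A's loop state over the processed prefix
def InvA (p : List Char) (st : List Char × List Char) : Prop :=
  st.2 = PySem.Set.ofList p ∧ st.1.Nodup ∧ ∀ c, c ∈ st.1 ↔ 2 ≤ (runsOf p).count c

theorem invA_fold (s : List Char) :
    ∀ n : Nat, n ≤ s.length →
      InvA (s.take n) ((PySem.List.pyRange 0 (n : Int) 1).foldl (solutionStep s) ([], [])) := by
  intro n
  induction n with
  | zero => intro _; simp [InvA, PySem.Set.ofList, runsOf]
  | succ n ih =>
      intro hn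
      have hn' : n ≤ s.length := Nat.le_of_succ_le hn
      have hlt : n < s.length := hn
      have hrange : PySem.List.pyRange 0 ((n + 1 : Nat) : Int) 1
          = PySem.List.pyRange 0 (n : Int) 1 ++ [(n : Int)] := by
        push_cast
        exact PySem.List.pyRange_one_succ_right (by positivity)
      rw [hrange, List.foldl_append]
      obtain ⟨h2, h1, h3⟩ := ih hn'
      set st := (PySem.List.pyRange 0 (n : Int) 1).foldl (solutionStep s) ([], []) with hst
      have htake : s.take (n + 1) = s.take n ++ [s[n]] := List.take_succ_eq_append_getElem hlt
      rw [htake]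
      have hc : PySem.List.pyGetD s ((n : Nat) : Int) ' ' = s[n] := PySem.List.pyGetD_ofNat s n ' ' hlt
      have hcontains : (st.2.contains s[n] = true) ↔ s[n] ∈ s.take n := by
        rw [h2]
        simp [PySem.Set.mem_ofList]
      unfold InvA
      simp only [List.foldl_cons, List.foldl_nil, solutionStep, hc]
      by_cases hmem : s[n] ∈ s.take n
      · -- the character was seen before: else-branch of A
        rw [if_neg (not_not_intro (hcontains.mpr hmem))]
        have hp_ne : s.take n ≠ [] := by intro h; rw [h] at hmem; simp at hmem
        have hn1 : 1 ≤ n := by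
          by_contra h
          have h0 : n = 0 := by omega
          subst h0; simp at hp_ne
        have htk : s.take n = s.take (n - 1) ++ [s[n - 1]] := by
          have h' := List.take_succ_eq_append_getElem (l := s) (i := n - 1) (by omega)
          rwa [Nat.sub_add_cancel hn1] at h'
        have hlast : (s.take n).getLast? = some s[n - 1] := by rw [htk, List.getLast?_concat]
        have hprev : PySem.List.pyGetD s ((n : Int) - 1) ' ' = s[n - 1] := by
          have hcast : ((n : Int) - 1) = ((n - 1 : Nat) : Int) := by omega
          rw [hcast]
          exact PySem.List.pyGetD_ofNat s (n - 1) ' ' (by omega)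
        have hrlast : (runsOf (s.take n)).getLast? = some s[n - 1] := by
          rw [runsOf_getLast?, hlast]
        have hmemr : s[n] ∈ runsOf (s.take n) := (mem_runsOf _ _).mpr hmem
        have hr_ne : runsOf (s.take n) ≠ [] := List.ne_nil_of_mem hmemr
        have hap : PySem.Set.ofList (s.take n ++ [s[n]]) = st.2 := by
          rw [h2, ofList_append_singleton, PySem.Set.add, if_pos (by simp [PySem.Set.mem_ofList, hmem])]
        by_cases hpc : s[n - 1] = s[n]
        · -- previous char equals current char: A keeps its state, the runs are unchanged
          have hcond : ¬ (PySem.List.pyGetD s ((n : Int) - 1) ' ' ≠ s[n] ∧ ¬ st.1.contains s[n] = true) := by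
            intro h; exact h.1 (by rw [hprev, hpc])
          rw [if_neg hcond]
          have hruns : runsOf (s.take n ++ [s[n]]) = runsOf (s.take n) := by
            rw [runsOf_append_singleton, runStep, if_neg]
            push_neg
            exact ⟨hr_ne, by rw [hrlast, hpc]⟩
          exact ⟨hap.symm, h1, fun x => by rw [hruns]; exact h3 x⟩
        · -- previous char differs: the current char starts one more run
          have hruns : runsOf (s.take n ++ [s[n]]) = runsOf (s.take n) ++ [s[n]] := by
            rw [runsOf_append_singleton, runStep, if_pos]
            right; rw [hrlast]; simp [hpc]
          have hcount1 : 1 ≤ (runsOf (s.take n)).count s[n] := List.count_pos_iff.mpr hmemr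
          by_cases hans : s[n] ∈ st.1
          · have hcond : ¬ (PySem.List.pyGetD s ((n : Int) - 1) ' ' ≠ s[n] ∧ ¬ st.1.contains s[n] = true) := by
              intro h; exact h.2 (by simp [hans])
            rw [if_neg hcond]
            refine ⟨hap.symm, h1, fun x => ?_⟩
            rw [hruns, List.count_append]
            have hone : List.count x [s[n]] = if x = s[n] then 1 else 0 := by
              by_cases hx : x = s[n]
              · subst hx; simp
              · rw [if_neg hx]
                exact List.count_eq_zero.mpr (by simp [hx])
            rw [hone]
            by_cases hx : x = s[n]
            · subst hx
              rw [if_pos rfl]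
              have h2c := (h3 _).mp hans
              constructor
              · intro _; omega
              · intro _; exact hans
            · rw [if_neg hx, Nat.add_zero]
              exact h3 x
          · have hcond : (PySem.List.pyGetD s ((n : Int) - 1) ' ' ≠ s[n] ∧ ¬ st.1.contains s[n] = true) := by
              refine ⟨by rw [hprev]; exact fun h => hpc h, by simp [hans]⟩
            rw [if_pos hcond]
            refine ⟨hap.symm, ?_, fun x => ?_⟩
            · rw [List.nodup_append]
              refine ⟨h1, by simp, ?_⟩
              intro a ha b hb heq
              simp only [List.mem_cons, List.not_mem_nil, or_false] at hb
              subst hb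
              exact hans (heq ▸ ha)
            · rw [hruns, List.count_append]
              have hone : List.count x [s[n]] = if x = s[n] then 1 else 0 := by
                by_cases hx : x = s[n]
                · subst hx; simp
                · rw [if_neg hx]
                  exact List.count_eq_zero.mpr (by simp [hx])
              rw [hone]
              simp only [List.mem_append, List.mem_singleton]
              by_cases hx : x = s[n]
              · subst hx
                rw [if_pos rfl]
                constructor
                · intro _; omega
                · intro _; right; rfl
              · rw [if_neg hx, Nat.add_zero]
                constructor
                · rintro (h | h)
                  · exact (h3 x).mp h
                  · exact absurd h hx
                · intro h; exact Or.inl ((h3 x).mpr h)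
      · -- first occurrence: appended to apear, and a first run of this char begins
        rw [if_pos (fun h => hmem (hcontains.mp h))]
        have hnr : s[n] ∉ runsOf (s.take n) := fun h => hmem ((mem_runsOf _ _).mp h)
        have hruns : runsOf (s.take n ++ [s[n]]) = runsOf (s.take n) ++ [s[n]] := by
          rw [runsOf_append_singleton, runStep, if_pos]
          by_cases h0 : runsOf (s.take n) = []
          · exact Or.inl h0
          · exact Or.inr (fun h => hnr (List.mem_of_getLast? h))
        refine ⟨?_, h1, fun x => ?_⟩
        · rw [h2, ofList_append_singleton,
            PySem.Set.add_of_not_mem (fun h => hmem ((PySem.Set.mem_ofList _ _).mp h))]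
        · rw [hruns, List.count_append]
          have hone : List.count x [s[n]] = if x = s[n] then 1 else 0 := by
            by_cases hx : x = s[n]
            · subst hx; simp
            · rw [if_neg hx]
              exact List.count_eq_zero.mpr (by simp [hx])
          rw [hone]
          by_cases hx : x = s[n]
          · subst hx
            rw [if_pos rfl, count_runsOf_zero _ _ hmem]
            constructor
            · intro h
              have h2c := (h3 _).mp h
              rw [count_runsOf_zero _ _ hmem] at h2c
              omega
            · intro h; omega
          · rw [if_neg hx, Nat.add_zero]
            exact h3 x

-- final agreement
theorem solution_spec : Claim_equal_solution := by
  unfold Claim_equal_solution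
  intro input_string _
  unfold Spec_solution solution solution_alt
  dsimp only
  obtain ⟨h2, h1, h3⟩ := invA_fold input_string.toList input_string.toList.length le_rfl
  rw [List.take_length] at h2 h3
  set p := input_string.toList with hp
  set st := (PySem.List.pyRange 0 ((p.length : Nat) : Int) 1).foldl (solutionStep p) ([], []) with hst
  set runs := runsOf p with hruns
  have hcounter :
      (runs.foldl (fun (d : PySem.Dict Char Int) k => d.insert k (d.getD k 0 + 1)) PySem.Dict.empty)
        = PySem.Dict.counter runs := PySem.Dict.foldl_insert_getD_add_one_eq_counter runs
  rw [hcounter, PySem.Dict.items_counter]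
  have hRbase :
      (((PySem.Set.ofList runs).map (fun k => (k, (runs.count k : Int)))).filter
          (fun q => decide (2 ≤ q.2))).map (fun q => q.1)
        = (PySem.Set.ofList runs).filter (fun k => decide (2 ≤ (runs.count k : Int))) := by
    rw [List.filter_map, List.map_map]
    simp [Function.comp_def]
  rw [hRbase]
  set R := (PySem.Set.ofList runs).filter (fun k => decide (2 ≤ (runs.count k : Int))) with hR
  have hR_nodup : R.Nodup := (PySem.Set.nodup_ofList runs).filter _
  have hR_mem : ∀ c, c ∈ R ↔ 2 ≤ runs.count c := by
    intro c
    rw [hR, List.mem_filter]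
    constructor
    · rintro ⟨_, h⟩
      simp at h
      exact_mod_cast h
    · intro h
      refine ⟨?_, by simpa using (by exact_mod_cast h : (2 : Int) ≤ (runs.count c : Int))⟩
      rw [PySem.Set.mem_ofList]
      exact List.count_pos_iff.mp (by omega)
  have hperm : st.1.Perm R := by
    rw [List.perm_ext_iff_of_nodup h1 hR_nodup]
    intro c
    rw [h3 c, hR_mem c]
  have hsorted : PySem.List.sorted st.1 (fun x => x) false = PySem.List.sorted R (fun x => x) false := by
    rw [PySem.List.sorted_id_eq_sorted_id_iff_perm]
    exact hperm
  have hnil_iff : st.1 = [] ↔ R = [] := by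
    constructor
    · intro h; exact (h ▸ hperm).symm.eq_nil
    · intro h; exact (h ▸ hperm).eq_nil
  by_cases hnil : st.1 = []
  · rw [if_neg (by simp [hnil]), if_neg (by simp [PySem.List.sorted_eq_nil_iff, hnil_iff.mp hnil])]
  · rw [if_pos hnil, if_pos (by simp only [ne_eq, PySem.List.sorted_eq_nil_iff]; exact fun h => hnil (hnil_iff.mpr h)), hsorted]
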